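-- pv_equiv track=rewrite | github.com/trusten5/scrape-models | js2yaml.py | snapshots_detailed_check
-- ===== SOURCE A (Python) =====
-- def snapshots_detailed_check(models_dict):
--     for model_name, model_data in models_dict.items():
--         snapshots = model_data.get("snapshots", [])
--         if not snapshots:
--             continue
--         for snapshot in snapshots:
--             if snapshot not in models_dict:
--                 return False
--     return True
-- ===== SOURCE B (Python) =====
-- def snapshots_detailed_check(models_dict):
--     all_snapshots = set()
--     for model_data in models_dict.values():
--         snapshots = model_data.get("snapshots", [])
--         if snapshots:
--             all_snapshots.update(snapshots)
--     return all_snapshots <= models_dict.keys()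
-- ===== Notes on version B (the rewrite author's own statement) =====
-- stated objective: simpler
-- what changed: Replaces the interleaved nested loop with early return by one pass that collects every snapshot name into a set and then a single subset test against the dict's keys.
import Mathlib
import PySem

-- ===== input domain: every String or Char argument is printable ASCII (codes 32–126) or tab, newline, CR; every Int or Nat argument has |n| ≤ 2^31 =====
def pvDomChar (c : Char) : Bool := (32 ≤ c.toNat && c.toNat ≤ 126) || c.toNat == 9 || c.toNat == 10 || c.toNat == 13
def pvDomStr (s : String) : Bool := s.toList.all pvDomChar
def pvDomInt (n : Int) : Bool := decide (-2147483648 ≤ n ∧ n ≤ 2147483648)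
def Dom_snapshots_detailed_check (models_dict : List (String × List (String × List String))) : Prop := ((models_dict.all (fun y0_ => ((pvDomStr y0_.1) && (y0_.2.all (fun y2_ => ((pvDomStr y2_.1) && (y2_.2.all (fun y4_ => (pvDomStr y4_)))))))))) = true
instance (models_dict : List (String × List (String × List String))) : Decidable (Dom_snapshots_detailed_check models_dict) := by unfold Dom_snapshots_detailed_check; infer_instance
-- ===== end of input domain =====

-- B replaces A's interleaved nested loops (early return) by collecting all snapshot
-- names into one set and a single subset test against the keys ("simpler" objective).

-- ===== PORT A =====
-- inner loop: 'for snapshot in snapshots: if snapshot not in models_dict: return False'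
def snapInnerA (keys : List String) : List String → Bool
  | [] => true
  | s :: ss => if keys.contains s then snapInnerA keys ss else false

-- outer loop over items, with the inner loop's early 'return False' propagated
def snapOuterA (keys : List String) : List (String × List (String × List String)) → Bool
  | [] => true
  | (_, md) :: rest =>
    let snapshots := PySem.Dict.getD (PySem.Dict.mk md) "snapshots" []
    if snapshots.isEmpty then snapOuterA keys rest
    else if snapInnerA keys snapshots then snapOuterA keys rest else false

def snapshots_detailed_check (models_dict : List (String × List (String × List String))) : Bool :=
  snapOuterA (PySem.Dict.keys (PySem.Dict.mk models_dict)) models_dict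

-- ===== PORT B =====
def snapshots_detailed_check_alt (models_dict : List (String × List (String × List String))) : Bool :=
  let all_snapshots :=
    models_dict.foldl
      (fun s p =>
        let snapshots := PySem.Dict.getD (PySem.Dict.mk p.2) "snapshots" []
        if snapshots.isEmpty then s else PySem.Set.update s snapshots)
      PySem.Set.empty
  PySem.Set.issubset all_snapshots (PySem.Dict.keys (PySem.Dict.mk models_dict))

-- ===== PRECONDITION & SPEC =====
def Spec_snapshots_detailed_check (models_dict : List (String × List (String × List String))) (out : Bool) : Prop := out = snapshots_detailed_check_alt models_dict
instance (models_dict : List (String × List (String × List String))) (out : Bool) : Decidable (Spec_snapshots_detailed_check models_dict out) := by unfold Spec_snapshots_detailed_check; infer_instance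

-- ===== CLAIM (what is proved, stated in full; the proofs are below) =====
def Claim_equal_snapshots_detailed_check : Prop := ∀ (models_dict : List (String × List (String × List String))), Dom_snapshots_detailed_check models_dict → Spec_snapshots_detailed_check models_dict (snapshots_detailed_check models_dict)

-- ===== LEMMAS AND PROOFS =====

theorem snapInnerA_eq_all (keys : List String) (l : List String) :
    snapInnerA keys l = l.all (fun s => keys.contains s) := by
  induction l with
  | nil => rfl
  | cons s ss ih =>
    simp only [snapInnerA, List.all_cons, ih]
    cases keys.contains s <;> simp

theorem snapOuterA_eq_all (keys : List String)
    (l : List (String × List (String × List String))) :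
    snapOuterA keys l
      = l.all (fun p => (PySem.Dict.getD (PySem.Dict.mk p.2) "snapshots" []).all (fun s => keys.contains s)) := by
  induction l with
  | nil => rfl
  | cons p rest ih =>
    obtain ⟨n, md⟩ := p
    simp only [snapOuterA, List.all_cons]
    by_cases h : (PySem.Dict.getD (PySem.Dict.mk md) "snapshots" ([] : List String)).isEmpty
    · rw [if_pos h, ih, List.isEmpty_iff.mp h]
      rw [List.all_nil, Bool.true_and]
    · rw [if_neg h, snapInnerA_eq_all]
      cases h2 : (PySem.Dict.getD (PySem.Dict.mk md) "snapshots" ([] : List String)).all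
          (fun s => keys.contains s) with
      | true => simp [ih]
      | false => simp

theorem mem_foldB (l : List (String × List (String × List String)))
    (s : PySem.Set String) (x : String) :
    x ∈ l.foldl
        (fun s p =>
          let snapshots := PySem.Dict.getD (PySem.Dict.mk p.2) "snapshots" []
          if snapshots.isEmpty then s else PySem.Set.update s snapshots) s
      ↔ x ∈ s ∨ ∃ p ∈ l, x ∈ PySem.Dict.getD (PySem.Dict.mk p.2) "snapshots" [] := by
  induction l generalizing s with
  | nil => simp
  | cons p rest ih =>
    simp only [List.foldl_cons, ih, List.mem_cons]
    by_cases h : (PySem.Dict.getD (PySem.Dict.mk p.2) "snapshots" ([] : List String)).isEmpty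
    · have he : (PySem.Dict.getD (PySem.Dict.mk p.2) "snapshots" ([] : List String)) = [] :=
        List.isEmpty_iff.mp h
      simp only [he]
      constructor
      · rintro (hx | ⟨q, hq, hxq⟩)
        · exact Or.inl hx
        · exact Or.inr ⟨q, Or.inr hq, hxq⟩
      · rintro (hx | ⟨q, (rfl | hq), hxq⟩)
        · exact Or.inl hx
        · simp [he] at hxq
        · exact Or.inr ⟨q, hq, hxq⟩
    · simp only [if_neg h, PySem.Set.mem_update]
      constructor
      · rintro ((hx | hx) | ⟨q, hq, hxq⟩)
        · exact Or.inl hx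
        · exact Or.inr ⟨p, Or.inl rfl, hx⟩
        · exact Or.inr ⟨q, Or.inr hq, hxq⟩
      · rintro (hx | ⟨q, (rfl | hq), hxq⟩)
        · exact Or.inl (Or.inl hx)
        · exact Or.inl (Or.inr hxq)
        · exact Or.inr ⟨q, hq, hxq⟩

-- ===== VERDICT (by name: the statement is the Claim_ definition above) =====
theorem snapshots_detailed_check_spec : Claim_equal_snapshots_detailed_check := by
  intro l _
  unfold Spec_snapshots_detailed_check
  unfold snapshots_detailed_check snapshots_detailed_check_alt
  rw [snapOuterA_eq_all]
  rw [Bool.eq_iff_iff, PySem.Set.issubset_iff, List.all_eq_true]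
  constructor
  · intro h x hx
    rcases (mem_foldB l PySem.Set.empty x).mp hx with hx | ⟨p, hp, hxp⟩
    · simp [PySem.Set.empty] at hx
    · have := h p hp
      rw [List.all_eq_true] at this
      simpa using this x hxp
  · intro h p hp
    rw [List.all_eq_true]
    intro x hx
    have : x ∈ PySem.Dict.keys (PySem.Dict.mk l) :=
      h x ((mem_foldB l PySem.Set.empty x).mpr (Or.inr ⟨p, hp, hx⟩))
    simpa using this
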